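-- pv_equiv track=rewrite | github.com/duzardo/tde-grafos | TESTES.py | encontrarParesMaisProdutivos
-- ===== SOURCE A (Python) =====
-- def encontrarParesMaisProdutivos(grafo, n=10):
--     # Criar uma lista de pares (aresta, peso)
--     paresProdutivos = []
--     for autor, vizinhos in grafo.items():
--         for vizinho, peso in vizinhos.items():
--             if (vizinho, autor, peso) not in paresProdutivos:  # Evitar duplicação de pares
--                 paresProdutivos.append((autor, vizinho, peso))
--
--     # Ordenar a lista de pares pelo peso em ordem decrescente
--     paresProdutivos.sort(key=lambda x: x[2], reverse=True)
--
--     # Selecionar os top n pares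
--     return paresProdutivos[:n]
-- ===== SOURCE B (Python) =====
-- def encontrarParesMaisProdutivos(grafo, n=10):
--     # One pass with a set for the reverse-edge dedup, then bounded selection:
--     # repeatedly extract the current maximum-weight pair n times (stable: first
--     # maximal wins ties) instead of fully sorting and slicing.
--     pares = []
--     vistos = set()
--     for autor, vizinhos in grafo.items():
--         for vizinho, peso in vizinhos.items():
--             if (vizinho, autor, peso) not in vistos:
--                 pares.append((autor, vizinho, peso))
--                 vistos.add((autor, vizinho, peso))
--     top = []
--     for _ in range(n):
--         if not pares:
--             break
--         melhor = max(pares, key=lambda x: x[2])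
--         pares.remove(melhor)
--         top.append(melhor)
--     return top
-- ===== Notes on version B (the rewrite author's own statement) =====
-- stated objective: alternative
-- what changed: B replaces A's quadratic list-membership dedup by a set of seen triples and replaces the full descending sort plus prefix slice by a bounded selection loop that extracts the first maximal-weight pair n times.
-- outside the precondition, e.g. on encontrarParesMaisProdutivos({'a': {'b': 1, 'c': 2}}, -1): A returns [('a', 'c', 2)], B returns []
import Mathlib
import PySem

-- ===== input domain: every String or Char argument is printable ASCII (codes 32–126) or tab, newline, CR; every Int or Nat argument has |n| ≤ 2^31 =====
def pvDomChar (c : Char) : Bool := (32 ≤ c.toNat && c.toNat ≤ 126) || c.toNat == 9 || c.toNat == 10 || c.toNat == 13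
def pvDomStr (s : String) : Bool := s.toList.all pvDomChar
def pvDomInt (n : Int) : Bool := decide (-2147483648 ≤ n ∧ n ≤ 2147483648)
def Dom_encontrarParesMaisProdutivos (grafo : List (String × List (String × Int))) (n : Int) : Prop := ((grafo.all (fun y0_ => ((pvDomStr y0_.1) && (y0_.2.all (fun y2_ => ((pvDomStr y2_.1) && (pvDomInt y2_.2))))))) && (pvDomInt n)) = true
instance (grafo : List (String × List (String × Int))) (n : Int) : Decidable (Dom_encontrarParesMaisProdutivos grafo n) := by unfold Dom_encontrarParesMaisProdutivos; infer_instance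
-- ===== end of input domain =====

-- B replaces A's list-membership dedup by a set of seen triples and A's full
-- descending sort + [:n] slice by a bounded selection loop (extract the first
-- maximal-weight pair n times); equivalence is claimed for n ≥ 0 (objective: alternative).

-- ===== PORT A =====
-- inner loop: for vizinho, peso in vizinhos.items(): if (vizinho, autor, peso) not in pares: pares.append(...)
def pvInnerA (autor : String) (vs : List (String × Int))
    (pares : List (String × String × Int)) : List (String × String × Int) :=
  vs.foldl (fun pares vp =>
    if pares.contains (vp.1, autor, vp.2) then pares
    else pares ++ [(autor, vp.1, vp.2)]) pares

-- outer loop over grafo.items() (dict arguments modelled via PySem.Dict.ofList)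
def pvPairsA (grafo : List (String × List (String × Int))) : List (String × String × Int) :=
  (PySem.Dict.ofList grafo).items.foldl
    (fun pares av => pvInnerA av.1 (PySem.Dict.ofList av.2).items pares) []

def encontrarParesMaisProdutivos (grafo : List (String × List (String × Int))) (n : Int) :
    List (String × String × Int) :=
  PySem.List.slice (PySem.List.sorted (pvPairsA grafo) (fun x => x.2.2) true) none (some n)

-- ===== PORT B =====
-- inner loop with state (pares, vistos): membership test against the set 'vistos'
def pvInnerB (autor : String) (vs : List (String × Int))
    (st : List (String × String × Int) × PySem.Set (String × String × Int)) :
    List (String × String × Int) × PySem.Set (String × String × Int) :=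
  vs.foldl (fun st vp =>
    if PySem.Set.contains st.2 (vp.1, autor, vp.2) then st
    else (st.1 ++ [(autor, vp.1, vp.2)], PySem.Set.add st.2 (autor, vp.1, vp.2))) st

def pvPairsB (grafo : List (String × List (String × Int))) :
    List (String × String × Int) × PySem.Set (String × String × Int) :=
  (PySem.Dict.ofList grafo).items.foldl
    (fun st av => pvInnerB av.1 (PySem.Dict.ofList av.2).items st) ([], PySem.Set.empty)

-- selection loop: for _ in range(n): if not pares: break; melhor = max(pares, key=peso);
-- pares.remove(melhor); top.append(melhor).  'remove?' cannot actually miss (melhor ∈ pares),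
-- so the '.getD pares' total form never takes its default.
def pvPickTop : Nat → List (String × String × Int) → List (String × String × Int) →
    List (String × String × Int)
  | 0, _, top => top
  | Nat.succ k, pares, top =>
    if pares = [] then top
    else
      match PySem.List.max? pares (fun x => x.2.2) with
      | none => top
      | some m => pvPickTop k ((PySem.List.remove? pares m).getD pares) (top ++ [m])

def encontrarParesMaisProdutivos_alt (grafo : List (String × List (String × Int))) (n : Int) :
    List (String × String × Int) :=
  pvPickTop n.toNat (pvPairsB grafo).1 []

-- ===== PRECONDITION & SPEC =====
-- Pre_ excludes negative n, on which A's slice [:n] trims |n| pairs from the tail while B's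
-- "top n" selection naturally yields an empty result: a corner no caller of a top-n function intends.
def Pre_encontrarParesMaisProdutivos (grafo : List (String × List (String × Int))) (n : Int) : Prop :=
  0 ≤ n
instance (grafo : List (String × List (String × Int))) (n : Int) :
    Decidable (Pre_encontrarParesMaisProdutivos grafo n) := by
  unfold Pre_encontrarParesMaisProdutivos; infer_instance

def pvWitness_encontrarParesMaisProdutivos : (List (String × List (String × Int))) × Int :=
  ([("a", [("b", 1), ("c", 2)]), ("b", [("a", 1)])], 2)

def Spec_encontrarParesMaisProdutivos (grafo : List (String × List (String × Int))) (n : Int) (out : List (String × String × Int)) : Prop := out = encontrarParesMaisProdutivos_alt grafo n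
instance (grafo : List (String × List (String × Int))) (n : Int) (out : List (String × String × Int)) : Decidable (Spec_encontrarParesMaisProdutivos grafo n out) := by unfold Spec_encontrarParesMaisProdutivos; infer_instance

-- ===== CLAIM (what is proved, stated in full; the proofs are below) =====
def Claim_equal_encontrarParesMaisProdutivos : Prop := ∀ (grafo : List (String × List (String × Int))) (n : Int), Dom_encontrarParesMaisProdutivos grafo n → Pre_encontrarParesMaisProdutivos grafo n → Spec_encontrarParesMaisProdutivos grafo n (encontrarParesMaisProdutivos grafo n)

-- ===== LEMMAS AND PROOFS =====

-- The stable descending sort starts with the FIRST maximal element (= Python max with key)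
-- and continues with the sort of the list with that element erased.
theorem pv_sorted_rev_max_cons {α κ : Type} [LinearOrder κ] [BEq α] [LawfulBEq α]
    (key : α → κ) (xs : List α) :
    PySem.List.sorted xs key true =
      (match PySem.List.max? xs key with
       | none => []
       | some m => m :: PySem.List.sorted (xs.erase m) key true) := by
  induction xs using List.reverseRecOn with
  | nil => rfl
  | append_singleton l x ih =>
    have hS : ∀ (ys : List α) (z : α), PySem.List.sorted (ys ++ [z]) key true =
        PySem.List.insertBy (fun a b => decide (key b < key a)) z (PySem.List.sorted ys key true) := by
      intro ys z
      rw [PySem.List.sorted_rev_eq_foldl_insertBy, PySem.List.sorted_rev_eq_foldl_insertBy,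
        List.foldl_append]
      rfl
    have hM : PySem.List.max? (l ++ [x]) key =
        (match PySem.List.max? l key with
         | none => some x
         | some m => if key m < key x then some x else some m) := by
      unfold PySem.List.max?
      rw [List.foldl_append]
      rcases h : List.foldl _ (none : Option α) l with _ | m <;> simp_all [PySem.List.max?]
    cases hml : PySem.List.max? l key with
    | none =>
      have hl : l = [] := (PySem.List.max?_eq_none_iff l key).1 hml
      subst hl
      simp [PySem.List.sorted, PySem.List.max?, PySem.List.insertBy]
    | some m =>
      rw [hS, ih, hml]
      by_cases hk : key m < key x
      · have hx : x ∉ l := by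
          intro hmem
          have := PySem.List.max?_isMax hml x hmem
          exact absurd (lt_of_le_of_lt this hk) (lt_irrefl _)
        rw [hM, hml]
        simp only [hk, if_pos]
        have he : (l ++ [x]).erase x = l := by
          rw [List.erase_append_right _ hx]
          simp
        rw [he, ih, hml]
        simp [PySem.List.insertBy, hk]
      · have hmem : m ∈ l := PySem.List.max?_mem hml
        rw [hM, hml]
        simp only [hk, if_false]
        have he : (l ++ [x]).erase m = l.erase m ++ [x] := List.erase_append_left _ hmem
        rw [he, hS]
        simp [PySem.List.insertBy, hk]

-- B's extraction loop computes top ++ (first k elements of the stable descending sort).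
theorem pv_pickTop_eq (k : Nat) : ∀ (xs top : List (String × String × Int)),
    pvPickTop k xs top = top ++ (PySem.List.sorted xs (fun x => x.2.2) true).take k := by
  induction k with
  | zero => intro xs top; simp [pvPickTop]
  | succ k ih =>
    intro xs top
    by_cases hxs : xs = []
    · subst hxs; simp [pvPickTop, PySem.List.sorted]
    · cases hm : PySem.List.max? xs (fun x => x.2.2) with
      | none => exact absurd ((PySem.List.max?_eq_none_iff _ _).1 hm) hxs
      | some m =>
        rw [pv_sorted_rev_max_cons (fun x => x.2.2) xs, hm]
        simp only [pvPickTop, hxs, hm, if_false]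
        rw [PySem.List.remove?_eq_some_erase xs m (PySem.List.max?_mem hm)]
        simp only [Option.getD_some]
        rw [ih]
        simp only [List.take_succ_cons, List.append_assoc, List.singleton_append]

-- The set 'vistos' always holds exactly the members of 'pares', so A's list-membership
-- test and B's set-membership test agree.
theorem pv_inner_agree (autor : String) (vs : List (String × Int)) :
    ∀ (pares : List (String × String × Int)) (vistos : PySem.Set (String × String × Int)),
      (∀ y, y ∈ pares ↔ y ∈ vistos) →
      pvInnerA autor vs pares = (pvInnerB autor vs (pares, vistos)).1 ∧
      (∀ y, y ∈ (pvInnerB autor vs (pares, vistos)).1 ↔ y ∈ (pvInnerB autor vs (pares, vistos)).2) := by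
  induction vs with
  | nil => intro pares vistos hinv; exact ⟨rfl, hinv⟩
  | cons vp vs ih =>
    intro pares vistos hinv
    have hc : pares.contains (vp.1, autor, vp.2) = PySem.Set.contains vistos (vp.1, autor, vp.2) := by
      simp only [PySem.Set.contains, List.contains_eq_mem]
      exact decide_eq_decide.mpr (hinv _)
    simp only [pvInnerA, pvInnerB, List.foldl_cons, hc]
    by_cases h : PySem.Set.contains vistos (vp.1, autor, vp.2) = true
    · simp only [h, if_pos]
      exact ih pares vistos hinv
    · simp only [h]
      refine ih _ _ ?_
      intro y
      simp only [Bool.false_eq_true, if_false, List.mem_append, PySem.Set.mem_add, hinv y,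
        List.mem_singleton]

def pvOuterA (items : List (String × List (String × Int))) (pares : List (String × String × Int)) :
    List (String × String × Int) :=
  items.foldl (fun pares av => pvInnerA av.1 (PySem.Dict.ofList av.2).items pares) pares

def pvOuterB (items : List (String × List (String × Int)))
    (st : List (String × String × Int) × PySem.Set (String × String × Int)) :
    List (String × String × Int) × PySem.Set (String × String × Int) :=
  items.foldl (fun st av => pvInnerB av.1 (PySem.Dict.ofList av.2).items st) st

theorem pv_outer_agree (items : List (String × List (String × Int))) :
    ∀ (pares : List (String × String × Int)) (vistos : PySem.Set (String × String × Int)),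
      (∀ y, y ∈ pares ↔ y ∈ vistos) →
      pvOuterA items pares = (pvOuterB items (pares, vistos)).1 := by
  induction items with
  | nil => intro pares vistos _; rfl
  | cons av items ih =>
    intro pares vistos hinv
    obtain ⟨h1, h2⟩ := pv_inner_agree av.1 (PySem.Dict.ofList av.2).items pares vistos hinv
    simp only [pvOuterA, pvOuterB, List.foldl_cons]
    have := ih (pvInnerB av.1 (PySem.Dict.ofList av.2).items (pares, vistos)).1
      (pvInnerB av.1 (PySem.Dict.ofList av.2).items (pares, vistos)).2 h2
    simp only [pvOuterA, pvOuterB] at this ⊢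
    rw [h1]
    exact this

theorem pv_pairs_agree (grafo : List (String × List (String × Int))) :
    pvPairsA grafo = (pvPairsB grafo).1 :=
  pv_outer_agree (PySem.Dict.ofList grafo).items [] PySem.Set.empty (fun _ => Iff.rfl)

-- ===== VERDICT (by name: the statement is the Claim_ definition above) =====
theorem encontrarParesMaisProdutivos_spec : Claim_equal_encontrarParesMaisProdutivos := by
  intro grafo n _dom hpre
  unfold Spec_encontrarParesMaisProdutivos
  unfold encontrarParesMaisProdutivos encontrarParesMaisProdutivos_alt
  rw [PySem.List.slice_to _ hpre, pv_pickTop_eq, pv_pairs_agree, List.nil_append]
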